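-- pv_equiv track=rewrite | github.com/thisishwan2/Algorithm | programmers/Level1/PCCP 모의고사 2회 2번.py | solution
-- ===== SOURCE A (Python) =====
-- import heapq
--
-- def solution(ability, number):
--     # n명중 가장 능력치가 낮은 2명을 뽑는 것을 number 번 반복
--     # 힙큐를 쓰면 될듯?
--     hq = []
--
--     for i in ability:
--         heapq.heappush(hq, i)
--
--     for i in range(number):
--         num1 = heapq.heappop(hq)
--         num2 = heapq.heappop(hq)
--         total = num1 + num2
--         heapq.heappush(hq, total)
--         heapq.heappush(hq, total)
--
--     return sum(hq)
-- ===== SOURCE B (Python) =====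
-- def solution(ability, number):
--     pool = list(ability)
--     for _ in range(number):
--         a = min(pool)
--         pool.remove(a)
--         b = min(pool)
--         pool.remove(b)
--         s = a + b
--         pool.append(s)
--         pool.append(s)
--     return sum(pool)
-- ===== Notes on version B (the rewrite author's own statement) =====
-- stated objective: alternative
-- what changed: Replaces the binary heap with a plain multiset kept as an unordered list: each round finds and removes the two minima by direct min()/remove() scans and appends two copies of their sum, instead of maintaining heap order through heappush/heappop.
import Mathlib
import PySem

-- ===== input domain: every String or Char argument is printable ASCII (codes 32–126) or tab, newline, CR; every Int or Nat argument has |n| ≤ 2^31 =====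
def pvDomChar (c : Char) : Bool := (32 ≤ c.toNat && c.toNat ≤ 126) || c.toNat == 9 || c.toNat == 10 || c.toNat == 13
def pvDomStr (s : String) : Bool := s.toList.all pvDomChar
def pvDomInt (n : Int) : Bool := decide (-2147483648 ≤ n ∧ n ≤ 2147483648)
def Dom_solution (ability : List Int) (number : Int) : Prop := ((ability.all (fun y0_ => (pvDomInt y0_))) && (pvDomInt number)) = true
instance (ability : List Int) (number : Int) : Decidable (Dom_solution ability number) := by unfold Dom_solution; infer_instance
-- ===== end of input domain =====

-- B replaces A's binary heap by a plain unordered multiset list with direct min-scan/remove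
-- per round (objective: alternative decomposition, same results; no speed claim).

-- ===== PORT A =====
-- heapq is modelled as a sorted-list priority queue: heappush = ordered insert, heappop =
-- pop the front. This is observationally exact for A's uses of the module: heappop returns
-- the minimum (CPython heapq's contract), the list always holds the same multiset as the
-- CPython heap array, and sum() is order-independent; heappop on a heap with <2 elements
-- raises IndexError, modelled by `none` and excluded by Pre_solution.
def pvHeappush (h : List Int) (x : Int) : List Int := List.orderedInsert (· ≤ ·) x h

-- the `for i in range(number)` loop: each round two heappops, one total, two heappushes
def pvHeapLoop : Nat → List Int → Option (List Int)
  | 0, h => some h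
  | n + 1, h =>
    match h with
    | num1 :: num2 :: rest => pvHeapLoop n (pvHeappush (pvHeappush rest (num1 + num2)) (num1 + num2))
    | _ => none   -- heappop IndexError

def solution (ability : List Int) (number : Int) : Int :=
  let hq := ability.foldl pvHeappush []
  ((pvHeapLoop number.toNat hq).map List.sum).getD 0   -- getD 0 unreachable under Pre_solution

-- ===== PORT B =====
-- each round: a = min(pool); pool.remove(a); b = min(pool); pool.remove(b); append s twice
def pvPoolLoop : Nat → List Int → Option (List Int)
  | 0, pool => some pool
  | n + 1, pool =>
    match PySem.List.min? pool (fun x => x) with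
    | none => none   -- min([]) ValueError
    | some a =>
      match PySem.List.remove? pool a with
      | none => none
      | some pool1 =>
        match PySem.List.min? pool1 (fun x => x) with
        | none => none
        | some b =>
          match PySem.List.remove? pool1 b with
          | none => none
          | some pool2 => pvPoolLoop n (pool2 ++ [a + b, a + b])

def solution_alt (ability : List Int) (number : Int) : Int :=
  ((pvPoolLoop number.toNat ability).map List.sum).getD 0   -- getD 0 unreachable under Pre_solution

-- ===== PRECONDITION & SPEC =====
-- Pre_ excludes exactly the inputs where Python A raises (IndexError from heappop:
-- number ≥ 1 with fewer than two abilities); A returns on every other input.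
def Pre_solution (ability : List Int) (number : Int) : Prop :=
  1 ≤ number → 2 ≤ ability.length
instance (ability : List Int) (number : Int) : Decidable (Pre_solution ability number) := by
  unfold Pre_solution; infer_instance

def pvWitness_solution : List Int × Int := ([10, 20, 30, 40], 3)

def Spec_solution (ability : List Int) (number : Int) (out : Int) : Prop := out = solution_alt ability number
instance (ability : List Int) (number : Int) (out : Int) : Decidable (Spec_solution ability number out) := by unfold Spec_solution; infer_instance

-- ===== CLAIM (what is proved, stated in full; the proofs are below) =====
def Claim_equal_solution : Prop := ∀ (ability : List Int) (number : Int), Dom_solution ability number → Pre_solution ability number → Spec_solution ability number (solution ability number)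

-- ===== LEMMAS AND PROOFS =====

-- the two loop results are related: both none, or permutations of each other
def pvOptPerm : Option (List Int) → Option (List Int) → Prop
  | none, none => True
  | some h, some p => h.Perm p
  | _, _ => False

theorem pvHeappush_sorted {h : List Int} (hs : h.Sorted (· ≤ ·)) (x : Int) :
    (pvHeappush h x).Sorted (· ≤ ·) := by
  simpa [pvHeappush] using List.Pairwise.orderedInsert x h hs

theorem pvHeappush_perm (h : List Int) (x : Int) : (pvHeappush h x).Perm (x :: h) :=
  List.perm_orderedInsert _ x h

-- the initial heapify: sorted and a permutation of the input
theorem pvHeapify_sorted_perm (ability : List Int) :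
    (ability.foldl pvHeappush []).Sorted (· ≤ ·) ∧ (ability.foldl pvHeappush []).Perm ability := by
  suffices H : ∀ (l acc : List Int), acc.Sorted (· ≤ ·) →
      (l.foldl pvHeappush acc).Sorted (· ≤ ·) ∧ (l.foldl pvHeappush acc).Perm (acc ++ l) by
    simpa using H ability [] List.Pairwise.nil
  intro l
  induction l with
  | nil => intro acc hs; exact ⟨hs, by simp⟩
  | cons x t ih =>
    intro acc hs
    have h1 := ih (pvHeappush acc x) (pvHeappush_sorted hs x)
    refine ⟨h1.1, h1.2.trans ?_⟩
    exact ((pvHeappush_perm acc x).append_right t).trans (by simpa using (List.perm_middle).symm)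

-- min over a permutation of a sorted nonempty list is its head
theorem pvMin_of_perm_sorted {a : Int} {rest pool : List Int}
    (hs : (a :: rest).Sorted (· ≤ ·)) (hp : (a :: rest).Perm pool) :
    PySem.List.min? pool (fun x => x) = some a := by
  obtain ⟨m, hm⟩ : ∃ m, PySem.List.min? pool (fun x => x) = some m := by
    cases hmin : PySem.List.min? pool (fun x => x) with
    | none =>
      have : pool = [] := (PySem.List.min?_eq_none_iff pool (fun x => x)).1 hmin
      subst this; exact absurd hp.length_eq (by simp)
    | some m => exact ⟨m, rfl⟩
  have hmem : m ∈ pool := PySem.List.min?_mem hm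
  have hmin' : ∀ y ∈ pool, m ≤ y := by
    intro y hy; simpa using PySem.List.min?_isMin hm y hy
  have ham : a ≤ m := by
    rcases List.mem_cons.1 ((hp.mem_iff).2 hmem) with h | h
    · exact le_of_eq h.symm
    · exact (List.sorted_cons.1 hs).1 m h
  have hma : m ≤ a := hmin' a ((hp.mem_iff).1 (by simp))
  rw [hm, le_antisymm hma ham]

-- one remove step: pool ~ a :: rest, removing a leaves a permutation of rest
theorem pvRemove_of_perm {a : Int} {rest pool : List Int} (hp : (a :: rest).Perm pool) :
    ∃ pool', PySem.List.remove? pool a = some pool' ∧ rest.Perm pool' := by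
  have hmem : a ∈ pool := (hp.mem_iff).1 (by simp)
  refine ⟨pool.erase a, PySem.List.remove?_eq_some_erase _ _ hmem, ?_⟩
  have := hp.erase a
  simpa using this

theorem pvLoop_perm : ∀ (n : Nat) (h pool : List Int), h.Sorted (· ≤ ·) → h.Perm pool →
    pvOptPerm (pvHeapLoop n h) (pvPoolLoop n pool) := by
  intro n
  induction n with
  | zero => intro h pool _ hp; simpa [pvHeapLoop, pvPoolLoop, pvOptPerm] using hp
  | succ n ih =>
    intro h pool hs hp
    match h with
    | [] =>
      have hpool : pool = [] := List.perm_nil.1 hp.symm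
      simp [pvHeapLoop, pvPoolLoop, hpool, PySem.List.min?, pvOptPerm]
    | [a] =>
      have hpool : pool = [a] := List.perm_singleton.1 hp.symm
      subst hpool
      have h1 : PySem.List.min? [a] (fun x => x) = some a := pvMin_of_perm_sorted hs hp
      have h2 : PySem.List.remove? [a] a = some ([] : List Int) := PySem.List.remove?_cons_self a []
      simp [pvHeapLoop, pvPoolLoop, h2, PySem.List.min?, pvOptPerm]
    | a :: b :: rest =>
      have h1 := pvMin_of_perm_sorted hs hp
      obtain ⟨pool1, hr1, hperm1⟩ := pvRemove_of_perm hp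
      have hs1 : (b :: rest).Sorted (· ≤ ·) := (List.sorted_cons.1 hs).2
      have h2 := pvMin_of_perm_sorted hs1 hperm1
      obtain ⟨pool2, hr2, hperm2⟩ := pvRemove_of_perm hperm1
      have hs2 : rest.Sorted (· ≤ ·) := (List.sorted_cons.1 hs1).2
      have hsort' : (pvHeappush (pvHeappush rest (a + b)) (a + b)).Sorted (· ≤ ·) :=
        pvHeappush_sorted (pvHeappush_sorted hs2 _) _
      have hperm' : (pvHeappush (pvHeappush rest (a + b)) (a + b)).Perm (pool2 ++ [a + b, a + b]) :=
        ((pvHeappush_perm _ _).trans ((pvHeappush_perm rest (a + b)).cons _)).trans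
          (((hperm2.cons _).cons _).trans
            ((List.perm_append_comm (l₁ := [a + b, a + b]) (l₂ := pool2)).trans (List.Perm.refl _)))
      have hrec := ih _ _ hsort' hperm'
      have eA : pvHeapLoop (n + 1) (a :: b :: rest)
          = pvHeapLoop n (pvHeappush (pvHeappush rest (a + b)) (a + b)) := rfl
      have eB : pvPoolLoop (n + 1) pool = pvPoolLoop n (pool2 ++ [a + b, a + b]) := by
        simp only [pvPoolLoop, h1, hr1, h2, hr2]
      rw [eA, eB]; exact hrec

-- ===== VERDICT (by name: the statement is the Claim_ definition above) =====
theorem solution_spec : Claim_equal_solution := by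
  intro ability number _ _
  unfold Spec_solution
  show (Option.map List.sum (pvHeapLoop number.toNat (ability.foldl pvHeappush []))).getD 0
      = (Option.map List.sum (pvPoolLoop number.toNat ability)).getD 0
  obtain ⟨hs, hp⟩ := pvHeapify_sorted_perm ability
  have H := pvLoop_perm number.toNat _ _ hs hp
  cases hA : pvHeapLoop number.toNat (ability.foldl pvHeappush []) with
  | none =>
    cases hB : pvPoolLoop number.toNat ability with
    | none => rfl
    | some p => rw [hA, hB] at H; simp [pvOptPerm] at H
  | some hres =>
    cases hB : pvPoolLoop number.toNat ability with
    | none => rw [hA, hB] at H; simp [pvOptPerm] at H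
    | some p =>
      rw [hA, hB] at H
      simp only [pvOptPerm] at H
      simpa using H.sum_eq
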